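-- pv_equiv track=rewrite | github.com/anieto-pixel/ZarcFit2025-07-09 | AuxiliaryClasses/WidgetTextBar.py | _sort_keys_by_suffix
-- ===== SOURCE A (Python) =====
-- def _sort_keys_by_suffix(keys):
--     """Return keys grouped by final letter (h/m/l) then alphabetic."""
--     buckets = {"h": [], "m": [], "l": [], "other": []}
--     for k in keys:
--         buckets[k[-1] if k[-1] in buckets else "other"].append(k)
--     return (
--         sorted(buckets["h"], reverse=True) +
--         sorted(buckets["m"], reverse=True) +
--         sorted(buckets["l"], reverse=True) +
--         sorted(buckets["other"], reverse=True)
--     )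
-- ===== SOURCE B (Python) =====
-- def _sort_keys_by_suffix(keys):
--     """Return keys grouped by final letter (h/m/l) then alphabetic."""
--     rank = {"h": 0, "m": 1, "l": 2}
--     ranked = sorted(keys, reverse=True)
--     return sorted(ranked, key=lambda k: rank.get(k[-1], 3))
-- ===== Notes on version B (the rewrite author's own statement) =====
-- stated objective: simpler
-- what changed: Replaced the four explicit suffix buckets plus four independent reverse sorts with a single full descending sort followed by one stable sort on the suffix rank (h<m<l<other), relying on sort stability to keep the descending order within each group.
import Mathlib
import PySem

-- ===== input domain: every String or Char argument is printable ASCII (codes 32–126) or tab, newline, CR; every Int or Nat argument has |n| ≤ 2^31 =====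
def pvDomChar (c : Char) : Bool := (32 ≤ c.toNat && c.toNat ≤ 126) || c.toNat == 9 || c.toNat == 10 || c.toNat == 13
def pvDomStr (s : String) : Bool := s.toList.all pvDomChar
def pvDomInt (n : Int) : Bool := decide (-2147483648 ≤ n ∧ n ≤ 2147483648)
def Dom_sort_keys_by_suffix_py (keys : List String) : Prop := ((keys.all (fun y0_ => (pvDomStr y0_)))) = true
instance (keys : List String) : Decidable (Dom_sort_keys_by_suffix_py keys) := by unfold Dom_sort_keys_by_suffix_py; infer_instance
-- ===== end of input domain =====

-- B replaces A's four explicit buckets and four independent sorts by one full descending sort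
-- followed by one stable sort on the suffix rank (objective: simpler).

-- k[-1] as a Char; the default ' ' is unreachable under Pre_ (Python raises IndexError on "").
def pvLastChar (k : String) : Char := (PySem.Str.pyGet? k (-1)).getD ' '

-- ===== PORT A =====
def sort_keys_by_suffix_py (keys : List String) : List String :=
  -- buckets = {"h": [], "m": [], "l": [], "other": []}
  let buckets0 : PySem.Dict String (List String) :=
    PySem.Dict.ofList [("h", []), ("m", []), ("l", []), ("other", [])]
  -- for k in keys: buckets[k[-1] if k[-1] in buckets else "other"].append(k)
  -- (k[-1], a 1-char Python str, is ported as String.ofList [pvLastChar k]; the key is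
  --  always present, so buckets[x].append(k) is modify x [] (· ++ [k]) and buckets[c] is getD c [])
  let buckets := keys.foldl (fun d k =>
      let c := String.ofList [pvLastChar k]
      d.modify (if d.contains c then c else "other") [] (fun l => l ++ [k])) buckets0
  PySem.List.sorted (buckets.getD "h" []) (fun x => x) true ++
  PySem.List.sorted (buckets.getD "m" []) (fun x => x) true ++
  PySem.List.sorted (buckets.getD "l" []) (fun x => x) true ++
  PySem.List.sorted (buckets.getD "other" []) (fun x => x) true

-- ===== PORT B =====
-- rank.get(k[-1], 3)  (rank = {"h": 0, "m": 1, "l": 2}; 1-char str keys ported as Char keys)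
def pvRank (k : String) : Int :=
  (PySem.Dict.ofList [('h', (0 : Int)), ('m', 1), ('l', 2)]).getD (pvLastChar k) 3

def sort_keys_by_suffix_py_alt (keys : List String) : List String :=
  let ranked := PySem.List.sorted keys (fun x => x) true
  PySem.List.sorted ranked pvRank false

-- ===== PRECONDITION & SPEC =====
-- Pre_ excludes lists containing the empty string, on which Python A (k[-1]) raises IndexError.
def Pre_sort_keys_by_suffix_py (keys : List String) : Prop := ∀ k ∈ keys, k ≠ ""
instance (keys : List String) : Decidable (Pre_sort_keys_by_suffix_py keys) := by unfold Pre_sort_keys_by_suffix_py; infer_instance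
def pvWitness_sort_keys_by_suffix_py : List String := ["Rh", "am", "bl", "z", "am"]

def Spec_sort_keys_by_suffix_py (keys : List String) (out : List String) : Prop := out = sort_keys_by_suffix_py_alt keys
instance (keys : List String) (out : List String) : Decidable (Spec_sort_keys_by_suffix_py keys out) := by unfold Spec_sort_keys_by_suffix_py; infer_instance

-- ===== CLAIM (what is proved, stated in full; the proofs are below) =====
def Claim_equal_sort_keys_by_suffix_py : Prop := ∀ (keys : List String), Dom_sort_keys_by_suffix_py keys → Pre_sort_keys_by_suffix_py keys → Spec_sort_keys_by_suffix_py keys (sort_keys_by_suffix_py keys)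

-- ===== LEMMAS AND PROOFS =====

-- ---- small String facts ----
lemma pvSingle_ne_other (c : Char) : String.ofList [c] ≠ "other" := by
  intro h; simpa using congrArg String.toList h

-- ---- the rank function, characterised by the last character ----
lemma pvRank_eq (k : String) :
    pvRank k = if pvLastChar k = 'h' then 0 else if pvLastChar k = 'm' then 1
               else if pvLastChar k = 'l' then 2 else 3 := by
  by_cases h1 : pvLastChar k = 'h' <;> by_cases h2 : pvLastChar k = 'm' <;>
    by_cases h3 : pvLastChar k = 'l' <;>
  simp [pvRank, h1, h2, h3, BEq.comm, PySem.Dict.ofList, PySem.Dict.getD, PySem.Dict.get?,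
    PySem.Dict.update, PySem.Dict.empty, PySem.Dict.insert, PySem.Dict.contains]

lemma pvRank_cases (k : String) : pvRank k = 0 ∨ pvRank k = 1 ∨ pvRank k = 2 ∨ pvRank k = 3 := by
  rw [pvRank_eq]; split_ifs <;> simp

-- ---- A's bucket selector as a pure function of the key ----
def pvSel (k : String) : String :=
  if pvLastChar k = 'h' ∨ pvLastChar k = 'm' ∨ pvLastChar k = 'l'
  then String.ofList [pvLastChar k] else "other"

lemma pvSingle_toList {c : Char} {s : String} (h : String.ofList [c] = s) : s.toList = [c] := by
  rw [← h]; simp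

lemma pvSel_eq (k : String) :
    pvSel k = if pvLastChar k = 'h' then "h" else if pvLastChar k = 'm' then "m"
              else if pvLastChar k = 'l' then "l" else "other" := by
  unfold pvSel
  by_cases h1 : pvLastChar k = 'h' <;> by_cases h2 : pvLastChar k = 'm' <;>
    by_cases h3 : pvLastChar k = 'l' <;> simp [h1, h2, h3]

lemma pvContains0 (d : PySem.Dict String (List String))
    (hc : ∀ s, d.contains s = (s == "h" || s == "m" || s == "l" || s == "other")) (k : String) :
    (if d.contains (String.ofList [pvLastChar k]) then String.ofList [pvLastChar k] else "other")
      = pvSel k := by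
  rw [hc, pvSel_eq]
  by_cases h1 : pvLastChar k = 'h'
  · simp [h1]
  · by_cases h2 : pvLastChar k = 'm'
    · simp [h2]
    · by_cases h3 : pvLastChar k = 'l'
      · simp [h3]
      · have e1 : String.ofList [pvLastChar k] ≠ "h" :=
          fun h => h1 (by simpa [eq_comm] using pvSingle_toList h)
        have e2 : String.ofList [pvLastChar k] ≠ "m" :=
          fun h => h2 (by simpa [eq_comm] using pvSingle_toList h)
        have e3 : String.ofList [pvLastChar k] ≠ "l" :=
          fun h => h3 (by simpa [eq_comm] using pvSingle_toList h)
        simp [e1, e2, e3, pvSingle_ne_other, h1, h2, h3]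

-- ---- A's grouping loop: each bucket is a filter of keys, in order ----
lemma pvFoldA (keys : List String) (d : PySem.Dict String (List String))
    (hc : ∀ s, d.contains s = (s == "h" || s == "m" || s == "l" || s == "other")) (c : String) :
    (keys.foldl (fun d k =>
        let cs := String.ofList [pvLastChar k]
        d.modify (if d.contains cs then cs else "other") [] (fun l => l ++ [k])) d).getD c []
      = d.getD c [] ++ keys.filter (fun k => pvSel k == c) := by
  induction keys generalizing d with
  | nil => simp
  | cons k ks ih =>
    simp only [List.foldl_cons, List.filter_cons]
    rw [pvContains0 d hc k]
    have hc' : ∀ s, ((d.modify (pvSel k) [] (fun l => l ++ [k])).contains s)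
        = (s == "h" || s == "m" || s == "l" || s == "other") := by
      intro s
      rw [PySem.Dict.contains_modify, hc]
      unfold pvSel
      split_ifs with h
      · rcases h with h | h | h <;>
          (rw [h]; by_cases hs : s = String.ofList [pvLastChar k] <;> simp_all)
      · by_cases hs : s = "other" <;> simp [hs]
    rw [ih _ hc', PySem.Dict.getD_modify]
    by_cases hck : pvSel k == c
    · have : c = pvSel k := (beq_iff_eq.mp hck).symm
      simp [this]
    · have : ¬ c = pvSel k := fun h => by simp [h] at hck
      simp [this, hck]

-- ---- insertion into a list all of whose elements refuse / accept x ----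
lemma pvInsertBy_skip (bf : String → String → Bool) (x : String) (l1 l2 : List String)
    (h : ∀ y ∈ l1, bf x y = false) :
    PySem.List.insertBy bf x (l1 ++ l2) = l1 ++ PySem.List.insertBy bf x l2 := by
  induction l1 with
  | nil => rfl
  | cons y ys ih =>
    have hy : bf x y = false := h y (by simp)
    show (if bf x y then x :: (y :: (ys ++ l2)) else y :: PySem.List.insertBy bf x (ys ++ l2))
        = y :: (ys ++ PySem.List.insertBy bf x l2)
    rw [hy]
    simp [ih (fun z hz => h z (by simp [hz]))]

lemma pvInsertBy_front (bf : String → String → Bool) (x : String) (l : List String)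
    (h : ∀ y ∈ l, bf x y = true) :
    PySem.List.insertBy bf x l = x :: l := by
  cases l with
  | nil => rfl
  | cons y ys =>
    show (if bf x y then x :: (y :: ys) else y :: PySem.List.insertBy bf x ys) = x :: (y :: ys)
    rw [h y (by simp)]
    simp

-- ---- the stable sort by rank is grouping by rank, order preserved ----
lemma pvRank_of_mem_filter {xs : List String} {i : Int} {y : String}
    (hy : y ∈ xs.filter (fun k => decide (pvRank k = i))) : pvRank y = i := by
  have := (List.mem_filter.mp hy).2
  simpa using this

lemma pvStable4 (xs : List String) :
    xs.foldl (fun acc x => PySem.List.insertBy (fun a b => decide (pvRank a < pvRank b)) x acc) []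
      = xs.filter (fun k => decide (pvRank k = 0)) ++ xs.filter (fun k => decide (pvRank k = 1))
        ++ xs.filter (fun k => decide (pvRank k = 2)) ++ xs.filter (fun k => decide (pvRank k = 3)) := by
  induction xs using List.reverseRecOn with
  | nil => rfl
  | append_singleton xs x ih =>
    rw [List.foldl_append, List.foldl_cons, List.foldl_nil, ih]
    have skip : ∀ (i : Int), pvRank x < i →
        ∀ y ∈ xs.filter (fun k => decide (pvRank k = i)),
          (fun a b => decide (pvRank a < pvRank b)) x y = true := by
      intro i hi y hy; simp only; rw [pvRank_of_mem_filter hy]; simpa using hi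
    have keep : ∀ (i : Int), i ≤ pvRank x →
        ∀ y ∈ xs.filter (fun k => decide (pvRank k = i)),
          (fun a b => decide (pvRank a < pvRank b)) x y = false := by
      intro i hi y hy; simp only; rw [pvRank_of_mem_filter hy]; simpa using hi
    have fil : ∀ (i : Int), (xs ++ [x]).filter (fun k => decide (pvRank k = i))
        = xs.filter (fun k => decide (pvRank k = i)) ++ (if pvRank x = i then [x] else []) := by
      intro i; by_cases h : pvRank x = i <;> simp [List.filter_append, h]
    rw [fil 0, fil 1, fil 2, fil 3]
    rcases pvRank_cases x with hx | hx | hx | hx <;> rw [hx] <;> norm_num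
    · rw [pvInsertBy_skip _ x _ _ (keep 0 (by omega)),
          pvInsertBy_front _ x _ (by
        intro y hy
        rcases List.mem_append.mp hy with hy | hy
        · exact skip 1 (by omega) y hy
        · rcases List.mem_append.mp hy with hy | hy
          · exact skip 2 (by omega) y hy
          · exact skip 3 (by omega) y hy)]
    · rw [pvInsertBy_skip _ x _ _ (keep 0 (by omega)),
          pvInsertBy_skip _ x _ _ (keep 1 (by omega)),
          pvInsertBy_front _ x _ (by
        intro y hy
        rcases List.mem_append.mp hy with hy | hy
        · exact skip 2 (by omega) y hy
        · exact skip 3 (by omega) y hy)]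
    · rw [pvInsertBy_skip _ x _ _ (keep 0 (by omega)),
          pvInsertBy_skip _ x _ _ (keep 1 (by omega)),
          pvInsertBy_skip _ x _ _ (keep 2 (by omega)),
          pvInsertBy_front _ x _ (fun y hy => skip 3 (by omega) y hy)]
    · rw [pvInsertBy_skip _ x _ _ (keep 0 (by omega)),
          pvInsertBy_skip _ x _ _ (keep 1 (by omega)),
          pvInsertBy_skip _ x _ _ (keep 2 (by omega)),
          PySem.List.insertBy_of_forall_not_before _ x _ (keep 3 (by omega))]

-- ---- filtering commutes with the descending sort (identity key; duplicates are literally equal) ----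
lemma pvSortFilter (keys : List String) (p : String → Bool) :
    (PySem.List.sorted keys (fun x => x) true).filter p
      = PySem.List.sorted (keys.filter p) (fun x => x) true := by
  refine List.Perm.eq_of_pairwise (le := fun a b : String => b ≤ a)
    (fun a b _ _ h1 h2 => le_antisymm h2 h1) ?_ ?_ ?_
  · exact (PySem.List.sorted_pairwise_rev keys (fun x => x)).sublist List.filter_sublist
  · simpa using PySem.List.sorted_pairwise_rev (keys.filter p) (fun x => x)
  · exact ((PySem.List.sorted_perm keys (fun x => x) true).filter p).trans
      (PySem.List.sorted_perm (keys.filter p) (fun x => x) true).symm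

-- ---- A's bucket predicates coincide with B's rank predicates ----
lemma pvSel_h (k : String) : (pvSel k == "h") = decide (pvRank k = 0) := by
  rw [pvSel_eq, pvRank_eq]; split_ifs <;> decide

lemma pvSel_m (k : String) : (pvSel k == "m") = decide (pvRank k = 1) := by
  rw [pvSel_eq, pvRank_eq]; split_ifs <;> decide

lemma pvSel_l (k : String) : (pvSel k == "l") = decide (pvRank k = 2) := by
  rw [pvSel_eq, pvRank_eq]; split_ifs <;> decide

lemma pvSel_o (k : String) : (pvSel k == "other") = decide (pvRank k = 3) := by
  rw [pvSel_eq, pvRank_eq]; split_ifs <;> decide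

lemma pvContainsInit :
    ∀ s, (PySem.Dict.ofList [("h", ([] : List String)), ("m", []), ("l", []), ("other", [])]).contains s
      = (s == "h" || s == "m" || s == "l" || s == "other") := by
  intro s
  simp [PySem.Dict.ofList, PySem.Dict.update, PySem.Dict.contains, PySem.Dict.empty,
    PySem.Dict.insert, BEq.comm, Bool.or_assoc]

-- ===== VERDICT (by name: the statement is the Claim_ definition above) =====
theorem sort_keys_by_suffix_py_spec : Claim_equal_sort_keys_by_suffix_py := by
  intro keys _ _
  show sort_keys_by_suffix_py keys = sort_keys_by_suffix_py_alt keys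
  -- A: each bucket is a filter of keys
  have hinit : ∀ c ∈ (["h", "m", "l", "other"] : List String),
      (PySem.Dict.ofList [("h", ([] : List String)), ("m", []), ("l", []), ("other", [])]).getD c [] = [] := by
    decide
  have hA : sort_keys_by_suffix_py keys
      = PySem.List.sorted (keys.filter (fun k => pvSel k == "h")) (fun x => x) true ++
        PySem.List.sorted (keys.filter (fun k => pvSel k == "m")) (fun x => x) true ++
        PySem.List.sorted (keys.filter (fun k => pvSel k == "l")) (fun x => x) true ++
        PySem.List.sorted (keys.filter (fun k => pvSel k == "other")) (fun x => x) true := by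
    simp only [sort_keys_by_suffix_py]
    rw [pvFoldA keys _ pvContainsInit "h", pvFoldA keys _ pvContainsInit "m",
        pvFoldA keys _ pvContainsInit "l", pvFoldA keys _ pvContainsInit "other",
        hinit "h" (by simp), hinit "m" (by simp), hinit "l" (by simp), hinit "other" (by simp)]
    simp
  -- B: stable sort by rank groups the descending sort by rank
  have hB : sort_keys_by_suffix_py_alt keys
      = PySem.List.sorted (keys.filter (fun k => decide (pvRank k = 0))) (fun x => x) true ++
        PySem.List.sorted (keys.filter (fun k => decide (pvRank k = 1))) (fun x => x) true ++
        PySem.List.sorted (keys.filter (fun k => decide (pvRank k = 2))) (fun x => x) true ++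
        PySem.List.sorted (keys.filter (fun k => decide (pvRank k = 3))) (fun x => x) true := by
    simp only [sort_keys_by_suffix_py_alt]
    rw [PySem.List.sorted_eq_foldl_insertBy, pvStable4,
        pvSortFilter, pvSortFilter, pvSortFilter, pvSortFilter]
  rw [hA, hB]
  simp only [pvSel_h, pvSel_m, pvSel_l, pvSel_o]
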